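-- pv_equiv track=rewrite | github.com/Maga-333/picklu | picklu.py | extension_check
-- ===== SOURCE A (Python) =====
-- SAFE_EXTENSIONS = (
--     ".pdf", ".ppt", ".pptx", ".doc", ".docx",
--     ".xls", ".xlsx", ".txt", ".csv",
--     ".mp4", ".mp3", ".jpg", ".png", ".jpeg"
-- )
--
-- DANGER_EXTENSIONS = (
--     '.exe','.msi','.bat','.cmd','.com','.scr','.pif',
--     '.jar','.apk','.app','.bin','.run',
--     '.ps1','.vbs','.js','.jse','.wsf','.wsh',
--     '.sh','.bash','.zsh','.ksh',
--     '.py','.php','.pl','.rb','.lua',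
--     '.dll','.sys','.drv','.ocx','.so','.dylib',
--     '.docm','.xlsm','.pptm','.dotm',
--     '.zip','.rar','.7z','.tar','.gz','.bz2',
--     '.xz','.iso','.img','.dmg',
--     '.html','.htm','.xml','.svg','.swf',
--     '.jsp','.asp','.aspx',
--     '.lnk','.url','.desktop',
--     '.torrent','.crx','.xpi','.deb','.rpm'
-- )
--
-- def extension_check(name):
--     name = name.lower()
--     if name.endswith(SAFE_EXTENSIONS):
--         return "SAFE"
--     for ext in DANGER_EXTENSIONS:
--         if name.endswith(ext):
--             return "DANGER"
--     return "UNKNOWN"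
-- ===== SOURCE B (Python) =====
-- EXT_CLASS = {
--     "pdf": "SAFE", "ppt": "SAFE", "pptx": "SAFE", "doc": "SAFE", "docx": "SAFE", "xls": "SAFE",
--     "xlsx": "SAFE", "txt": "SAFE", "csv": "SAFE", "mp4": "SAFE", "mp3": "SAFE", "jpg": "SAFE",
--     "png": "SAFE", "jpeg": "SAFE",
--     "exe": "DANGER", "msi": "DANGER", "bat": "DANGER", "cmd": "DANGER", "com": "DANGER", "scr": "DANGER",
--     "pif": "DANGER", "jar": "DANGER", "apk": "DANGER", "app": "DANGER", "bin": "DANGER", "run": "DANGER",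
--     "ps1": "DANGER", "vbs": "DANGER", "js": "DANGER", "jse": "DANGER", "wsf": "DANGER", "wsh": "DANGER",
--     "sh": "DANGER", "bash": "DANGER", "zsh": "DANGER", "ksh": "DANGER", "py": "DANGER", "php": "DANGER",
--     "pl": "DANGER", "rb": "DANGER", "lua": "DANGER", "dll": "DANGER", "sys": "DANGER", "drv": "DANGER",
--     "ocx": "DANGER", "so": "DANGER", "dylib": "DANGER", "docm": "DANGER", "xlsm": "DANGER", "pptm": "DANGER",
--     "dotm": "DANGER", "zip": "DANGER", "rar": "DANGER", "7z": "DANGER", "tar": "DANGER", "gz": "DANGER",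
--     "bz2": "DANGER", "xz": "DANGER", "iso": "DANGER", "img": "DANGER", "dmg": "DANGER", "html": "DANGER",
--     "htm": "DANGER", "xml": "DANGER", "svg": "DANGER", "swf": "DANGER", "jsp": "DANGER", "asp": "DANGER",
--     "aspx": "DANGER", "lnk": "DANGER", "url": "DANGER", "desktop": "DANGER", "torrent": "DANGER", "crx": "DANGER",
--     "xpi": "DANGER", "deb": "DANGER", "rpm": "DANGER"
-- }
--
-- def extension_check(name):
--     name = name.lower()
--     i = name.rfind('.')
--     if i == -1:
--         return "UNKNOWN"
--     return EXT_CLASS.get(name[i + 1:], "UNKNOWN")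
-- ===== Notes on version B (the rewrite author's own statement) =====
-- stated objective: alternative
-- what changed: Instead of testing endswith against a 14-tuple and then linearly scanning 62 danger extensions with endswith, B extracts the dotless extension once (substring after the last dot found by rfind) and classifies it with a single lookup in a literal dict mapping extension to class.
import Mathlib
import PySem

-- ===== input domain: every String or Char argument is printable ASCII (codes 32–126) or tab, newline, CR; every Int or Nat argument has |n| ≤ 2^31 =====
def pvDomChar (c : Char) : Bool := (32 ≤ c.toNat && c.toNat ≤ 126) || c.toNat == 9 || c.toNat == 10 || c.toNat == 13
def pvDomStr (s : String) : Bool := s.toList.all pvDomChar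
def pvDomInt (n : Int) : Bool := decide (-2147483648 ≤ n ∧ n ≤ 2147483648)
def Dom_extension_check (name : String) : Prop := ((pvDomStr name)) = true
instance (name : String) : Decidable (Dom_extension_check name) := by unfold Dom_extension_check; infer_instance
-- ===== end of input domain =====

-- B replaces A's endswith-over-a-tuple plus a linear endswith scan of DANGER_EXTENSIONS by extracting
-- the extension once (substring after the last dot found by rfind) and doing ONE dict lookup in a
-- dotless-key classification table; equivalence is exact.


-- ===== PORT A =====
def pvSafeExts : List String :=
  [".pdf", ".ppt", ".pptx", ".doc", ".docx", ".xls", ".xlsx", ".txt",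
   ".csv", ".mp4", ".mp3", ".jpg", ".png", ".jpeg"]

def pvDangerExts : List String :=
  [".exe", ".msi", ".bat", ".cmd", ".com", ".scr", ".pif", ".jar",
   ".apk", ".app", ".bin", ".run", ".ps1", ".vbs", ".js", ".jse",
   ".wsf", ".wsh", ".sh", ".bash", ".zsh", ".ksh", ".py", ".php",
   ".pl", ".rb", ".lua", ".dll", ".sys", ".drv", ".ocx", ".so",
   ".dylib", ".docm", ".xlsm", ".pptm", ".dotm", ".zip", ".rar", ".7z",
   ".tar", ".gz", ".bz2", ".xz", ".iso", ".img", ".dmg", ".html",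
   ".htm", ".xml", ".svg", ".swf", ".jsp", ".asp", ".aspx", ".lnk",
   ".url", ".desktop", ".torrent", ".crx", ".xpi", ".deb", ".rpm"]

-- A's 'for ext in DANGER_EXTENSIONS: if name.endswith(ext): return "DANGER"' loop
def pvDangerLoop (n : String) : List String → String
  | [] => "UNKNOWN"
  | e :: rest => if PySem.Str.endswith n e then "DANGER" else pvDangerLoop n rest

def extension_check (name : String) : String :=
  let n := PySem.Str.lower name
  -- name.endswith(SAFE_EXTENSIONS): endswith on a tuple is true iff some member matches
  if pvSafeExts.any (fun e => PySem.Str.endswith n e) then "SAFE"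
  else pvDangerLoop n pvDangerExts

-- ===== PORT B =====
-- Source B's literal dict EXT_CLASS: dotless extension -> classification
def pvExtClass : PySem.Dict String String := PySem.Dict.ofList
  [("pdf", "SAFE"), ("ppt", "SAFE"), ("pptx", "SAFE"), ("doc", "SAFE"), ("docx", "SAFE"),
   ("xls", "SAFE"), ("xlsx", "SAFE"), ("txt", "SAFE"), ("csv", "SAFE"), ("mp4", "SAFE"),
   ("mp3", "SAFE"), ("jpg", "SAFE"), ("png", "SAFE"), ("jpeg", "SAFE"),
   ("exe", "DANGER"), ("msi", "DANGER"), ("bat", "DANGER"), ("cmd", "DANGER"), ("com", "DANGER"),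
   ("scr", "DANGER"), ("pif", "DANGER"), ("jar", "DANGER"), ("apk", "DANGER"), ("app", "DANGER"),
   ("bin", "DANGER"), ("run", "DANGER"), ("ps1", "DANGER"), ("vbs", "DANGER"), ("js", "DANGER"),
   ("jse", "DANGER"), ("wsf", "DANGER"), ("wsh", "DANGER"), ("sh", "DANGER"), ("bash", "DANGER"),
   ("zsh", "DANGER"), ("ksh", "DANGER"), ("py", "DANGER"), ("php", "DANGER"), ("pl", "DANGER"),
   ("rb", "DANGER"), ("lua", "DANGER"), ("dll", "DANGER"), ("sys", "DANGER"), ("drv", "DANGER"),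
   ("ocx", "DANGER"), ("so", "DANGER"), ("dylib", "DANGER"), ("docm", "DANGER"), ("xlsm", "DANGER"),
   ("pptm", "DANGER"), ("dotm", "DANGER"), ("zip", "DANGER"), ("rar", "DANGER"), ("7z", "DANGER"),
   ("tar", "DANGER"), ("gz", "DANGER"), ("bz2", "DANGER"), ("xz", "DANGER"), ("iso", "DANGER"),
   ("img", "DANGER"), ("dmg", "DANGER"), ("html", "DANGER"), ("htm", "DANGER"), ("xml", "DANGER"),
   ("svg", "DANGER"), ("swf", "DANGER"), ("jsp", "DANGER"), ("asp", "DANGER"), ("aspx", "DANGER"),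
   ("lnk", "DANGER"), ("url", "DANGER"), ("desktop", "DANGER"), ("torrent", "DANGER"), ("crx", "DANGER"),
   ("xpi", "DANGER"), ("deb", "DANGER"), ("rpm", "DANGER")]

def extension_check_alt (name : String) : String :=
  let n := PySem.Str.lower name
  let i := PySem.Str.rfind n "."
  if i == -1 then "UNKNOWN"
  else PySem.Dict.getD pvExtClass (PySem.Str.slice n (some (i + 1)) none) "UNKNOWN"

-- ===== PRECONDITION & SPEC =====
def Spec_extension_check (name : String) (out : String) : Prop := out = extension_check_alt name
instance (name : String) (out : String) : Decidable (Spec_extension_check name out) := by unfold Spec_extension_check; infer_instance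

-- ===== CLAIM (what is proved, stated in full; the proofs are below) =====
def Claim_equal_extension_check : Prop := ∀ (name : String), Dom_extension_check name → Spec_extension_check name (extension_check name)

-- ===== LEMMAS AND PROOFS =====

-- proof-only views of the constants: the dotless keys, grouped by class
def pvSafeKeys : List String :=
  ["pdf", "ppt", "pptx", "doc", "docx", "xls", "xlsx", "txt",
   "csv", "mp4", "mp3", "jpg", "png", "jpeg"]

def pvDangerKeys : List String :=
  ["exe", "msi", "bat", "cmd", "com", "scr", "pif", "jar",
   "apk", "app", "bin", "run", "ps1", "vbs", "js", "jse",
   "wsf", "wsh", "sh", "bash", "zsh", "ksh", "py", "php",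
   "pl", "rb", "lua", "dll", "sys", "drv", "ocx", "so",
   "dylib", "docm", "xlsm", "pptm", "dotm", "zip", "rar", "7z",
   "tar", "gz", "bz2", "xz", "iso", "img", "dmg", "html",
   "htm", "xml", "svg", "swf", "jsp", "asp", "aspx", "lnk",
   "url", "desktop", "torrent", "crx", "xpi", "deb", "rpm"]

theorem pvDotted_safe : pvSafeExts = pvSafeKeys.map (fun k => String.ofList ('.' :: k.toList)) := by decide

theorem pvDotted_danger : pvDangerExts = pvDangerKeys.map (fun k => String.ofList ('.' :: k.toList)) := by decide

theorem pvExtClass_eq : pvExtClass = PySem.Dict.mk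
    (pvSafeKeys.map (fun k => (k, "SAFE")) ++ pvDangerKeys.map (fun k => (k, "DANGER"))) := by
  set_option maxRecDepth 4096 in decide

-- first-match association lookup, the shape Dict.getD takes on a literal dict
def pvAssoc : List (String × String) → String → String
  | [], _ => "UNKNOWN"
  | (k, v) :: t, s => if k == s then v else pvAssoc t s

theorem pvGetD_mk (l : List (String × String)) (s : String) :
    PySem.Dict.getD (PySem.Dict.mk l) s "UNKNOWN" = pvAssoc l s := by
  induction l with
  | nil => simp [PySem.Dict.getD, PySem.Dict.get?, pvAssoc]
  | cons p t ih =>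
    obtain ⟨k, v⟩ := p
    rw [PySem.Dict.getD_eq_get?_getD, PySem.Dict.get?_mk_cons]
    unfold pvAssoc
    split <;> simp_all [PySem.Dict.getD_eq_get?_getD]

theorem pvAssoc_map_append (A : List String) (v : String) (rest : List (String × String)) (s : String) :
    pvAssoc (A.map (fun k => (k, v)) ++ rest) s
      = if A.any (fun k => k == s) then v else pvAssoc rest s := by
  induction A with
  | nil => simp
  | cons k t ih =>
    simp only [List.map_cons, List.cons_append, pvAssoc, List.any_cons, ih]
    by_cases h : k == s <;> simp [h]

theorem pvAny_dotted (A : List String) (r : List Char) :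
    (A.map (fun k => String.ofList ('.' :: k.toList))).any (fun e => e.toList == '.' :: r)
      = A.any (fun k => k == String.ofList r) := by
  induction A with
  | nil => rfl
  | cons k t ih =>
    simp only [List.map_cons, List.any_cons, ih]
    congr 1
    by_cases h : k = String.ofList r
    · subst h; simp
    · have h1 : k.toList ≠ r := by
        intro hc
        exact h (by rw [← hc]; simp)
      have h2 : (String.ofList ('.' :: k.toList)).toList = '.' :: k.toList := by simp
      rw [h2]
      simp [h1, h]

-- every extension constant is a dot followed by dot-free characters
def pvShaped (e : String) : Bool :=
  match e.toList with
  | '.' :: r => !r.contains '.'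
  | _ => false

theorem pvShaped_all : ∀ e ∈ pvSafeExts ++ pvDangerExts, pvShaped e = true := by decide

theorem pvShaped_spec (e : String) (h : pvShaped e = true) :
    ∃ r : List Char, e.toList = '.' :: r ∧ '.' ∉ r := by
  unfold pvShaped at h
  split at h
  · next r heq =>
      refine ⟨r, heq, fun hm => ?_⟩
      rw [Bool.not_eq_eq_eq_not, Bool.not_true] at h
      exact absurd (List.contains_iff_mem.mpr hm) (by rw [h]; exact Bool.false_ne_true)
  · exact absurd h (by simp)

-- singleton-prefix characterisation
theorem pvPrefixDot (l : List Char) (i : Nat) :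
    (['.'].isPrefixOf (l.drop i)) = true ↔ l[i]? = some '.' := by
  rw [List.isPrefixOf_iff_prefix]
  constructor
  · rintro ⟨t, ht⟩
    have : (l.drop i)[0]? = some '.' := by rw [← ht]; rfl
    simpa [List.getElem?_drop] using this
  · intro h
    have : (l.drop i)[0]? = some '.' := by simpa [List.getElem?_drop] using h
    rcases hd : l.drop i with _ | ⟨c, t⟩
    · rw [hd] at this; simp at this
    · rw [hd] at this; simp at this
      subst this
      exact ⟨t, rfl⟩

-- spec of PySem.Chars.rfind.go for the single-character needle ['.']
theorem pvGoCases (l : List Char) (n : Nat) :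
    (PySem.Chars.rfind.go l ['.'] n = -1 ∧ ∀ i : Nat, i ≤ n → l[i]? ≠ some '.')
    ∨ (∃ k : Nat, k ≤ n ∧ PySem.Chars.rfind.go l ['.'] n = (k : Int) ∧ l[k]? = some '.' ∧
        ∀ i : Nat, k < i → i ≤ n → l[i]? ≠ some '.') := by
  induction n with
  | zero =>
    by_cases h : (['.'].isPrefixOf l) = true
    · right
      refine ⟨0, le_refl _, by simp [PySem.Chars.rfind.go, h], ?_, by omega⟩
      exact (pvPrefixDot l 0).mp (by simpa using h)
    · left
      refine ⟨by simp [PySem.Chars.rfind.go, h], ?_⟩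
      intro i hi
      interval_cases i
      exact fun hc => h (by simpa using (pvPrefixDot l 0).mpr hc)
  | succ j ih =>
    by_cases h : (['.'].isPrefixOf (l.drop (j + 1))) = true
    · right
      exact ⟨j + 1, le_refl _, by simp [PySem.Chars.rfind.go, h],
        (pvPrefixDot l (j + 1)).mp h, by omega⟩
    · have hne : l[j+1]? ≠ some '.' := fun hc => h ((pvPrefixDot l (j+1)).mpr hc)
      have hgo : PySem.Chars.rfind.go l ['.'] (j + 1) = PySem.Chars.rfind.go l ['.'] j := by
        simp [PySem.Chars.rfind.go, h]
      rcases ih with ⟨h1, h2⟩ | ⟨k, hk, h1, h2, h3⟩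
      · left
        refine ⟨by rw [hgo]; exact h1, ?_⟩
        intro i hi
        rcases Nat.lt_or_ge i (j + 1) with hlt | hge
        · exact h2 i (by omega)
        · have : i = j + 1 := by omega
          rw [this]; exact hne
      · right
        refine ⟨k, by omega, by rw [hgo]; exact h1, h2, ?_⟩
        intro i hik hi
        rcases Nat.lt_or_ge i (j + 1) with hlt | hge
        · exact h3 i hik (by omega)
        · have : i = j + 1 := by omega
          rw [this]; exact hne

-- rfind over the whole list: either no dot, or the position of the LAST dot
theorem pvRfindCases (l : List Char) :
    (PySem.Chars.rfind l ['.'] = -1 ∧ '.' ∉ l)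
    ∨ (∃ k : Nat, PySem.Chars.rfind l ['.'] = (k : Int) ∧ l[k]? = some '.' ∧
        ∀ i : Nat, k < i → l[i]? ≠ some '.') := by
  rcases pvGoCases l l.length with ⟨h1, h2⟩ | ⟨k, hk, h1, h2, h3⟩
  · left
    refine ⟨h1, fun hmem => ?_⟩
    rcases List.mem_iff_getElem?.mp hmem with ⟨i, hi⟩
    have : i < l.length := (List.getElem?_eq_some_iff.mp hi).1
    exact h2 i (by omega) hi
  · right
    refine ⟨k, h1, h2, fun i hik => ?_⟩
    intro hi
    have : i < l.length := (List.getElem?_eq_some_iff.mp hi).1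
    exact h3 i hik (by omega) hi

-- uniqueness of a "dot then dot-free" suffix
theorem pvDotSuffixUnique (l a b : List Char) (ra rb : List Char)
    (hA : a = '.' :: ra) (hB : b = '.' :: rb) (hra : '.' ∉ ra) (hrb : '.' ∉ rb)
    (hsa : a <:+ l) (hsb : b <:+ l) : a = b := by
  rcases List.suffix_or_suffix_of_suffix hsa hsb with h | h
  · rw [hB] at h
    rcases List.suffix_cons_iff.mp h with h' | h'
    · rw [h', hB]
    · exact absurd (h'.mem (by rw [hA]; exact List.mem_cons_self)) hrb
  · rw [hA] at h
    rcases List.suffix_cons_iff.mp h with h' | h'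
    · rw [h', hA]
    · exact absurd (h'.mem (by rw [hB]; exact List.mem_cons_self)) hra

-- with the last dot at k: endswith e is exactly "e is the extension l.drop k"
theorem pvEndswithIff (l : List Char) (k : Nat) (hk : l[k]? = some '.')
    (hafter : ∀ i : Nat, k < i → l[i]? ≠ some '.')
    (e : String) (he : pvShaped e = true) :
    PySem.Chars.endswith l e.toList = true ↔ e.toList = l.drop k := by
  rcases pvShaped_spec e he with ⟨r, her, hr⟩
  have hklt : k < l.length := (List.getElem?_eq_some_iff.mp hk).1
  have hdropk : l.drop k = '.' :: l.drop (k + 1) := by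
    rw [List.drop_eq_getElem_cons hklt]
    rw [(List.getElem?_eq_some_iff.mp hk).2]
  have hdropfree : '.' ∉ l.drop (k + 1) := by
    intro hmem
    rcases List.mem_iff_getElem?.mp hmem with ⟨j, hj⟩
    rw [List.getElem?_drop] at hj
    exact hafter (k + 1 + j) (by omega) hj
  constructor
  · intro hend
    have hsuf : e.toList <:+ l := (PySem.Chars.endswith_iff l e.toList).mp hend
    exact pvDotSuffixUnique l e.toList (l.drop k) r (l.drop (k + 1)) her hdropk hr hdropfree
      hsuf (List.drop_suffix k l)
  · intro heq
    exact (PySem.Chars.endswith_iff l e.toList).mpr (heq ▸ List.drop_suffix k l)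

-- with no dot in l, endswith e is false for every shaped e
theorem pvEndswithFalse (l : List Char) (hnd : '.' ∉ l) (e : String) (he : pvShaped e = true) :
    PySem.Chars.endswith l e.toList = false := by
  rcases pvShaped_spec e he with ⟨r, her, hr⟩
  by_contra h
  have hend : PySem.Chars.endswith l e.toList = true := by
    cases hb : PySem.Chars.endswith l e.toList
    · exact absurd hb h
    · rfl
  have hsuf : e.toList <:+ l := (PySem.Chars.endswith_iff l e.toList).mp hend
  exact hnd (hsuf.mem (by rw [her]; exact List.mem_cons_self))

-- the danger loop returns DANGER iff some element matches
theorem pvDangerLoop_eq (n : String) (ds : List String) :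
    pvDangerLoop n ds = if ds.any (fun e => PySem.Str.endswith n e) then "DANGER" else "UNKNOWN" := by
  induction ds with
  | nil => rfl
  | cons e rest ih =>
    cases h : PySem.Str.endswith n e with
    | true => simp only [pvDangerLoop, h, List.any_cons, Bool.true_or, if_true]
    | false => simp only [pvDangerLoop, h, List.any_cons, Bool.false_or, ih]; rfl

theorem pvAnyCongrMem {α : Type} (l : List α) (p q : α → Bool) (h : ∀ e ∈ l, p e = q e) :
    l.any p = l.any q := by
  induction l with
  | nil => rfl
  | cons x xs ih =>
    simp only [List.any_cons, h x List.mem_cons_self,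
      ih (fun e he => h e (List.mem_cons_of_mem _ he))]

-- ===== VERDICT (by name: the statement is the Claim_ definition above) =====
theorem extension_check_spec : Claim_equal_extension_check := by
  intro name _
  unfold Spec_extension_check extension_check extension_check_alt
  simp only [PySem.Str.endswith_eq, PySem.Str.rfind_eq]
  generalize PySem.Str.lower name = m
  have hdotstr : (".":String).toList = ['.'] := rfl
  rcases pvRfindCases m.toList with ⟨h1, h2⟩ | ⟨k, h1, h2, h3⟩
  · -- no dot: both sides are "UNKNOWN"
    have hany : (pvSafeExts.any fun e => PySem.Chars.endswith m.toList e.toList) = false := by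
      rw [List.any_eq_false]
      intro e hemem
      simp only [Bool.not_eq_true]
      exact pvEndswithFalse m.toList h2 e (pvShaped_all e (List.mem_append_left _ hemem))
    have hloop : pvDangerLoop m pvDangerExts = "UNKNOWN" := by
      rw [pvDangerLoop_eq]
      have hh : (pvDangerExts.any fun e => PySem.Str.endswith m e) = false := by
        rw [List.any_eq_false]
        intro e hemem
        simp only [PySem.Str.endswith_eq, Bool.not_eq_true]
        exact pvEndswithFalse m.toList h2 e (pvShaped_all e (List.mem_append_right _ hemem))
      rw [hh]; rfl
    simp [hdotstr, h1, hany, hloop]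
  · -- last dot at k: both sides decide by the dotless extension rest = m.toList.drop (k+1)
    have hne : ((k : Int) == -1) = false := by
      simp only [beq_eq_false_iff_ne, ne_eq]
      omega
    have hklt : k < m.toList.length := (List.getElem?_eq_some_iff.mp h2).1
    have hdropk : m.toList.drop k = '.' :: m.toList.drop (k + 1) := by
      rw [List.drop_eq_getElem_cons hklt]
      rw [(List.getElem?_eq_some_iff.mp h2).2]
    have hext : (PySem.Str.slice m (some ((k:Int) + 1)) none).toList = m.toList.drop (k + 1) := by
      simp only [PySem.Str.slice]
      rw [String.toList_ofList]
      simp only [PySem.Chars.slice_eq_listSlice]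
      rw [PySem.List.slice_from m.toList (by omega : (0:Int) ≤ (k:Int) + 1)]
      norm_num
    set rest : List Char := m.toList.drop (k + 1) with hrest
    have hmatch : ∀ e ∈ pvSafeExts ++ pvDangerExts,
        PySem.Chars.endswith m.toList e.toList = (e.toList == '.' :: rest) := by
      intro e hemem
      have hiff := pvEndswithIff m.toList k h2 h3 e (pvShaped_all e hemem)
      rw [hdropk] at hiff
      cases hb : PySem.Chars.endswith m.toList e.toList with
      | true => exact (beq_iff_eq.mpr (hiff.mp hb)).symm
      | false =>
        cases hb2 : (e.toList == '.' :: rest) with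
        | true => exact absurd (hiff.mpr (beq_iff_eq.mp hb2)) (by rw [hb]; exact Bool.false_ne_true)
        | false => rfl
    have hsafe : (pvSafeExts.any fun e => PySem.Chars.endswith m.toList e.toList)
        = pvSafeKeys.any (fun x => x == String.ofList rest) := by
      rw [pvAnyCongrMem pvSafeExts _ (fun e => e.toList == '.' :: rest)
          (fun e he => hmatch e (List.mem_append_left _ he))]
      rw [pvDotted_safe, pvAny_dotted]
    have hdanger : (pvDangerExts.any fun e => PySem.Chars.endswith m.toList e.toList)
        = pvDangerKeys.any (fun x => x == String.ofList rest) := by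
      rw [pvAnyCongrMem pvDangerExts _ (fun e => e.toList == '.' :: rest)
          (fun e he => hmatch e (List.mem_append_right _ he))]
      rw [pvDotted_danger, pvAny_dotted]
    have hloop : pvDangerLoop m pvDangerExts
        = if pvDangerKeys.any (fun x => x == String.ofList rest) then "DANGER" else "UNKNOWN" := by
      rw [pvDangerLoop_eq, ← hdanger]
      have hh : (pvDangerExts.any fun e => PySem.Str.endswith m e)
          = (pvDangerExts.any fun e => PySem.Chars.endswith m.toList e.toList) := by
        apply pvAnyCongrMem
        intro e _
        rw [PySem.Str.endswith_eq]
      rw [hh]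
    have hB : PySem.Dict.getD pvExtClass (PySem.Str.slice m (some ((k:Int) + 1)) none) "UNKNOWN"
        = if pvSafeKeys.any (fun x => x == String.ofList rest) then "SAFE"
          else if pvDangerKeys.any (fun x => x == String.ofList rest) then "DANGER" else "UNKNOWN" := by
      have hs : PySem.Str.slice m (some ((k:Int) + 1)) none = String.ofList rest := by
        apply String.toList_inj.mp
        rw [hext, String.toList_ofList]
      rw [hs, pvExtClass_eq, pvGetD_mk, pvAssoc_map_append,
        ← List.append_nil (pvDangerKeys.map (fun k => (k, "DANGER"))), pvAssoc_map_append]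
      simp only [pvAssoc]
    simp only [hdotstr, h1, hne, Bool.false_eq_true, if_false, hB, hsafe, hloop]
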